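-- pv_equiv track=rewrite | github.com/hamdanyasser/NLP-NER-Project | src/data/bc5cdr_parser.py | fix_bio_sequence
-- ===== SOURCE A (Python) =====
-- from typing import List, Dict, Tuple, Optional, Set
--
-- def fix_bio_sequence(tags: List[str]) -> List[str]:
--     """
--     Fix invalid BIO sequences by converting orphan I- tags to B- tags.
--
--     Args:
--         tags: List of BIO tags (potentially invalid)
--
--     Returns:
--         Fixed list of BIO tags
--     """
--     fixed_tags = tags.copy()
--     prev_tag = 'O'
--
--     for i, tag in enumerate(fixed_tags):
--         if tag.startswith('I-'):
--             entity_type = tag[2:]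
--             expected_prev = [f'B-{entity_type}', f'I-{entity_type}']
--
--             if prev_tag not in expected_prev:
--                 # Convert orphan I- to B-
--                 fixed_tags[i] = f'B-{entity_type}'
--
--         prev_tag = fixed_tags[i]
--
--     return fixed_tags
-- ===== SOURCE B (Python) =====
-- from itertools import groupby
-- from typing import List, Optional
--
--
-- def _key(tag: str) -> Optional[str]:
--     """Entity type of a B-/I- tag, or None for anything else."""
--     return tag[2:] if tag.startswith(('B-', 'I-')) else None
--
--
-- def fix_bio_sequence(tags: List[str]) -> List[str]:
--     """Fix invalid BIO sequences by grouping the tags into maximal runs of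
--     consecutive tags with the same entity type (via itertools.groupby) and
--     re-heading each run: only the FIRST tag of a typed run can be an orphan,
--     so an I-X at a run head becomes B-X and everything else is kept."""
--     out: List[str] = []
--     for k, grp in groupby(tags, key=_key):
--         run = list(grp)
--         if k is not None and run[0].startswith('I-'):
--             run[0] = 'B-' + k
--         out.extend(run)
--     return out
-- ===== Notes on version B (the rewrite author's own statement) =====
-- stated objective: alternative
-- what changed: Replaces A's stateful forward pass that threads a running prev_tag through its own fixed output with an itertools.groupby-based pass: the tags are split into maximal runs of consecutive tags with equal entity type and only the head of each typed run is re-written (I-X -> B-X), correct because inside a run every tag's predecessor has its own type, so only run heads can be orphans.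
import Mathlib
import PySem

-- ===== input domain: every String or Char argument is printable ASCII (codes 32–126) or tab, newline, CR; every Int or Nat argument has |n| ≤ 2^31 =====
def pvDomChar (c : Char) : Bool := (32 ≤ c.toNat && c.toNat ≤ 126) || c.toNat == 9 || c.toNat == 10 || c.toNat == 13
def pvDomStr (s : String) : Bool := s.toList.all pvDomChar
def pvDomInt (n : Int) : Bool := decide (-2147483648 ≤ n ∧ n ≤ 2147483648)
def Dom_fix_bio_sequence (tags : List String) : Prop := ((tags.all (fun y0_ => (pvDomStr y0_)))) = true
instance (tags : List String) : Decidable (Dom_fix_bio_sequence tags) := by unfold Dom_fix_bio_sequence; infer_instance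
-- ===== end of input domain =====

-- B replaces A's stateful forward pass (threading prev_tag through its own fixed output)
-- by grouping the tags into maximal same-entity-type runs and re-heading each run;
-- objective: alternative.

-- ===== PORT A =====
-- A's loop: thread prev_tag; writing fixed_tags[i] = emitting the fixed value cur.
def pvFixA : String → List String → List String
  | _, [] => []
  | prev, tag :: rest =>
    let cur :=
      if PySem.Str.startswith tag "I-" = true then
        let e := PySem.Str.slice tag (some 2) none
        if ¬ (prev = "B-" ++ e ∨ prev = "I-" ++ e) then "B-" ++ e else tag
      else tag
    cur :: pvFixA cur rest

def fix_bio_sequence (tags : List String) : List String := pvFixA "O" tags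

-- ===== PORT B =====
-- Source B's _key: entity type of a B-/I- tag, None otherwise.
def pvKey (t : String) : Option String :=
  if (PySem.Str.startswith t "B-" || PySem.Str.startswith t "I-") = true then
    some (PySem.Str.slice t (some 2) none)
  else none

-- port of itertools.groupby(tags, key=_key): the list of maximal runs of
-- consecutive tags with equal key (exact grouping semantics of groupby).
def pvGroups : List String → List (List String)
  | [] => []
  | t :: r =>
    (t :: r.takeWhile (fun x => pvKey x == pvKey t)) ::
      pvGroups (r.dropWhile (fun x => pvKey x == pvKey t))
  termination_by l => l.length
  decreasing_by
    simpa using Nat.lt_succ_of_le (List.length_dropWhile_le _ _)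

-- Source B's loop body: re-head one run (run[0] = 'B-' + k when it is an orphan I-).
def pvFixRun (g : List String) : List String :=
  match g with
  | [] => []
  | t :: r =>
    match pvKey t with
    | some k => if PySem.Str.startswith t "I-" = true then ("B-" ++ k) :: r else t :: r
    | none => t :: r

def fix_bio_sequence_alt (tags : List String) : List String :=
  (pvGroups tags).flatMap pvFixRun

-- ===== PRECONDITION & SPEC =====
def Spec_fix_bio_sequence (tags : List String) (out : List String) : Prop := out = fix_bio_sequence_alt tags
instance (tags : List String) (out : List String) : Decidable (Spec_fix_bio_sequence tags out) := by unfold Spec_fix_bio_sequence; infer_instance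

-- ===== CLAIM (what is proved, stated in full; the proofs are below) =====
def Claim_equal_fix_bio_sequence : Prop := ∀ (tags : List String), Dom_fix_bio_sequence tags → Spec_fix_bio_sequence tags (fix_bio_sequence tags)

-- ===== LEMMAS AND PROOFS =====

-- the local step of A's loop, with q the compared previous tag
def pvStep (q t : String) : String :=
  if PySem.Str.startswith t "I-" = true then
    let e := PySem.Str.slice t (some 2) none
    if ¬ (q = "B-" ++ e ∨ q = "I-" ++ e) then "B-" ++ e else t
  else t

-- intermediate form: the stateless pass reading the ORIGINAL previous element
def pvGo2 : String → List String → List String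
  | _, [] => []
  | q, t :: r => pvStep q t :: pvGo2 t r

def pvRel (p q : String) : Prop :=
  ∀ e, (p = "B-" ++ e ∨ p = "I-" ++ e) ↔ (q = "B-" ++ e ∨ q = "I-" ++ e)

theorem startswith_I_decomp (t : String) (h : PySem.Str.startswith t "I-" = true) :
    t = "I-" ++ PySem.Str.slice t (some 2) none := by
  simp only [PySem.Str.startswith_eq, PySem.Chars.startswith_iff] at h
  obtain ⟨r, hr⟩ := h
  have ht : t.toList = 'I' :: '-' :: r := by simpa using hr.symm
  apply String.ext
  simp [pysem, ht, PySem.List.slice_from]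

theorem startswith_B_decomp (t : String) (h : PySem.Str.startswith t "B-" = true) :
    t = "B-" ++ PySem.Str.slice t (some 2) none := by
  simp only [PySem.Str.startswith_eq, PySem.Chars.startswith_iff] at h
  obtain ⟨r, hr⟩ := h
  have ht : t.toList = 'B' :: '-' :: r := by simpa using hr.symm
  apply String.ext
  simp [pysem, ht, PySem.List.slice_from]

theorem key_B (e : String) : pvKey ("B-" ++ e) = some e := by
  have hs : PySem.Str.startswith ("B-" ++ e) "B-" = true := by
    rw [PySem.Str.startswith_eq, PySem.Chars.startswith_iff]
    exact ⟨e.toList, by simp [pysem]⟩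
  have hsl : PySem.Str.slice ("B-" ++ e) (some 2) none = e := by
    apply String.ext; simp [pysem, PySem.List.slice_from]
  unfold pvKey
  rw [if_pos (by rw [hs]; rfl), hsl]

theorem key_I (e : String) : pvKey ("I-" ++ e) = some e := by
  have hs : PySem.Str.startswith ("I-" ++ e) "I-" = true := by
    rw [PySem.Str.startswith_eq, PySem.Chars.startswith_iff]
    exact ⟨e.toList, by simp [pysem]⟩
  have hsl : PySem.Str.slice ("I-" ++ e) (some 2) none = e := by
    apply String.ext; simp [pysem, PySem.List.slice_from]
  unfold pvKey
  rw [if_pos (by rw [hs]; simp), hsl]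

-- membership in A's expected_prev list is exactly key equality
theorem mem_iff_key (p e : String) :
    (p = "B-" ++ e ∨ p = "I-" ++ e) ↔ pvKey p = some e := by
  constructor
  · rintro (h | h) <;> subst h
    · exact key_B e
    · exact key_I e
  · intro h
    unfold pvKey at h
    by_cases hc : (PySem.Str.startswith p "B-" || PySem.Str.startswith p "I-") = true
    · rw [if_pos hc] at h
      have he : PySem.Str.slice p (some 2) none = e := by injection h
      rcases Bool.or_eq_true_iff.mp hc with hb | hi
      · exact Or.inl (by rw [← he]; exact startswith_B_decomp p hb)
      · exact Or.inr (by rw [← he]; exact startswith_I_decomp p hi)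
    · rw [if_neg hc] at h; exact absurd h (by simp)

theorem key_of_startswith_I (t : String) (h : PySem.Str.startswith t "I-" = true) :
    pvKey t = some (PySem.Str.slice t (some 2) none) := by
  unfold pvKey; rw [if_pos (by rw [h]; simp)]

theorem not_startswith_of_key_none (t : String) (h : pvKey t = none) :
    PySem.Str.startswith t "I-" = false := by
  by_contra hc
  rw [key_of_startswith_I t (by simpa using hc)] at h
  exact absurd h (by simp)

-- pvStep in terms of keys
theorem step_same (q t : String) (h : pvKey q = pvKey t) : pvStep q t = t := by
  unfold pvStep
  by_cases hi : PySem.Str.startswith t "I-" = true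
  · have hk := key_of_startswith_I t hi
    have : q = "B-" ++ PySem.Str.slice t (some 2) none ∨
           q = "I-" ++ PySem.Str.slice t (some 2) none :=
      (mem_iff_key q _).mpr (h.trans hk)
    rw [if_pos hi]
    show (if ¬ (q = "B-" ++ PySem.Str.slice t (some 2) none ∨
                q = "I-" ++ PySem.Str.slice t (some 2) none)
          then "B-" ++ PySem.Str.slice t (some 2) none else t) = t
    rw [if_neg (not_not_intro this)]
  · rw [if_neg hi]

theorem step_diff (q t : String) (h : pvKey q ≠ pvKey t) :
    pvStep q t = if PySem.Str.startswith t "I-" = true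
                 then "B-" ++ PySem.Str.slice t (some 2) none else t := by
  unfold pvStep
  by_cases hi : PySem.Str.startswith t "I-" = true
  · have hk := key_of_startswith_I t hi
    have hn : ¬ (q = "B-" ++ PySem.Str.slice t (some 2) none ∨
                 q = "I-" ++ PySem.Str.slice t (some 2) none) := by
      intro hm
      exact h (((mem_iff_key q _).mp hm).trans hk.symm)
    rw [if_pos hi, if_pos hi]
    show (if ¬ (q = "B-" ++ PySem.Str.slice t (some 2) none ∨
                q = "I-" ++ PySem.Str.slice t (some 2) none)
          then "B-" ++ PySem.Str.slice t (some 2) none else t)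
         = "B-" ++ PySem.Str.slice t (some 2) none
    rw [if_pos hn]
  · rw [if_neg hi, if_neg hi]

theorem pvRel_refl (p : String) : pvRel p p := fun _ => Iff.rfl

-- the fixed value of t is membership-equivalent to t itself
theorem pvRel_step (p t : String) : pvRel (pvStep p t) t := by
  intro e
  rw [mem_iff_key, mem_iff_key]
  constructor <;> intro h
  · by_cases hk : pvKey p = pvKey t
    · rwa [step_same p t hk] at h
    · rw [step_diff p t hk] at h
      by_cases hi : PySem.Str.startswith t "I-" = true
      · rw [if_pos hi, key_B] at h
        rw [key_of_startswith_I t hi, h]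
      · rwa [if_neg hi] at h
  · by_cases hk : pvKey p = pvKey t
    · rwa [step_same p t hk]
    · rw [step_diff p t hk]
      by_cases hi : PySem.Str.startswith t "I-" = true
      · rw [if_pos hi, key_B]
        rw [key_of_startswith_I t hi] at h; exact h.symm.symm
      · rwa [if_neg hi]

theorem pvStep_congr (p q t : String) (h : pvRel p q) : pvStep p t = pvStep q t := by
  unfold pvStep
  dsimp only
  have hiff := h (PySem.Str.slice t (some 2) none)
  split_ifs <;> first | rfl | (exfalso; tauto)

-- A's stateful pass equals the stateless pass whenever the threaded prev is
-- membership-equivalent to the original previous tag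
theorem fixA_eq_go2 (l : List String) : ∀ p q, pvRel p q → pvFixA p l = pvGo2 q l := by
  induction l with
  | nil => intro p q _; rfl
  | cons t r ih =>
    intro p q h
    show pvStep p t :: pvFixA (pvStep p t) r = pvStep q t :: pvGo2 t r
    rw [pvStep_congr p q t h]
    rw [ih (pvStep q t) t (pvRel_step q t)]

-- the stateless pass leaves a run of same-key tags untouched
theorem go2_run (b : List String) :
    ∀ (a : List String) (p : String), (∀ x ∈ a, pvKey x = pvKey p) →
      pvGo2 p (a ++ b) = a ++ pvGo2 (a.getLastD p) b := by
  intro a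
  induction a with
  | nil => intro p _; simp
  | cons x r ih =>
    intro p h
    have hx : pvKey x = pvKey p := h x (by simp)
    show pvStep p x :: pvGo2 x (r ++ b) = x :: (r ++ pvGo2 ((x :: r).getLastD p) b)
    rw [step_same p x hx.symm]
    have hr : ∀ y ∈ r, pvKey y = pvKey x := by
      intro y hy; rw [h y (by simp [hy]), hx]
    rw [ih x hr, List.getLastD_cons]

theorem key_getLastD (a : List String) (p : String) (h : ∀ x ∈ a, pvKey x = pvKey p) :
    pvKey (a.getLastD p) = pvKey p := by
  cases a with
  | nil => rfl
  | cons x r =>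
    have : (x :: r).getLastD p = (x :: r).getLast (by simp) := by
      simp [List.getLastD_eq_getLast?, List.getLast?_eq_some_getLast]
    rw [this]
    exact h _ (List.getLast_mem _)

-- stateless pass = B's grouped pass, by strong induction on the length
theorem go2_groups : ∀ (n : Nat) (l : List String) (q : String), l.length ≤ n →
    (match l with
     | [] => True
     | t :: _ => pvKey q ≠ pvKey t ∨ pvKey t = none) →
    pvGo2 q l = (pvGroups l).flatMap pvFixRun := by
  intro n
  induction n with
  | zero =>
    intro l q hl _
    have : l = [] := List.length_eq_zero_iff.mp (Nat.le_zero.mp hl)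
    subst this; simp [pvGo2, pvGroups]
  | succ m ih =>
    intro l q hl hcond
    cases l with
    | nil => simp [pvGo2, pvGroups]
    | cons t r =>
      have hsplit : r.takeWhile (fun x => pvKey x == pvKey t) ++
                    r.dropWhile (fun x => pvKey x == pvKey t) = r :=
        List.takeWhile_append_dropWhile
      set a := r.takeWhile (fun x => pvKey x == pvKey t) with ha
      set b := r.dropWhile (fun x => pvKey x == pvKey t) with hb
      have hamem : ∀ x ∈ a, pvKey x = pvKey t := by
        intro x hx
        have := List.mem_takeWhile_imp (ha ▸ hx)
        simpa using this
      -- head step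
      have hmatch : pvFixRun (t :: a) =
          (match pvKey t with
           | some k => if PySem.Str.startswith t "I-" = true then ("B-" ++ k) :: a else t :: a
           | none => t :: a) := rfl
      have hhead : pvFixRun (t :: a) = pvStep q t :: a := by
        rw [hmatch]
        rcases hcond with hne | hnone
        · rw [step_diff q t hne]
          by_cases hi : PySem.Str.startswith t "I-" = true
          · rw [key_of_startswith_I t hi]
            show (if PySem.Str.startswith t "I-" = true
                  then ("B-" ++ PySem.Str.slice t (some 2) none) :: a else t :: a) =
                 (if PySem.Str.startswith t "I-" = true
                  then "B-" ++ PySem.Str.slice t (some 2) none else t) :: a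
            rw [if_pos hi, if_pos hi]
          · rw [if_neg hi]
            cases hk : pvKey t with
            | none => rfl
            | some k =>
              show (if PySem.Str.startswith t "I-" = true
                    then ("B-" ++ k) :: a else t :: a) = t :: a
              rw [if_neg hi]
        · have hi := not_startswith_of_key_none t hnone
          have hstep : pvStep q t = t := by
            unfold pvStep; rw [if_neg (by rw [hi]; decide)]
          rw [hstep, hnone]
      -- body
      show pvStep q t :: pvGo2 t r = (pvGroups (t :: r)).flatMap pvFixRun
      rw [pvGroups]
      rw [List.flatMap_cons]
      rw [← ha, ← hb, hhead]
      have hgo : pvGo2 t r = a ++ pvGo2 (a.getLastD t) b := by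
        conv_lhs => rw [← hsplit]
        exact go2_run b a t hamem
      rw [hgo]
      have hrec : pvGo2 (a.getLastD t) b = (pvGroups b).flatMap pvFixRun := by
        apply ih
        · have h1 : b.length ≤ r.length := hb ▸ List.length_dropWhile_le _ _
          have h2 : r.length ≤ m := by simpa using Nat.succ_le_succ_iff.mp hl
          omega
        · cases hbcase : b with
          | nil => trivial
          | cons t' r' =>
            left
            have hlen : 0 < (r.dropWhile (fun x => pvKey x == pvKey t)).length := by
              rw [← hb, hbcase]; simp
            have hnot := List.dropWhile_get_zero_not (p := fun x => pvKey x == pvKey t) r hlen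
            have hget : (r.dropWhile (fun x => pvKey x == pvKey t)).get ⟨0, hlen⟩ = t' := by
              have : r.dropWhile (fun x => pvKey x == pvKey t) = t' :: r' := by rw [← hb, hbcase]
              simp [List.get_eq_getElem, this]
            rw [hget] at hnot
            have hne' : pvKey t' ≠ pvKey t := by simpa using hnot
            rw [key_getLastD a t hamem]
            exact fun h => hne' h.symm
      rw [hrec]
      simp

theorem key_O : pvKey "O" = none := by decide

-- ===== VERDICT (by name: the statement is the Claim_ definition above) =====
theorem fix_bio_sequence_spec : Claim_equal_fix_bio_sequence := by
  intro tags _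
  show fix_bio_sequence tags = fix_bio_sequence_alt tags
  unfold fix_bio_sequence fix_bio_sequence_alt
  rw [fixA_eq_go2 tags "O" "O" (pvRel_refl "O")]
  apply go2_groups tags.length tags "O" le_rfl
  cases tags with
  | nil => trivial
  | cons t r =>
    by_cases h : pvKey t = none
    · exact Or.inr h
    · exact Or.inl (by rw [key_O]; exact fun hh => h hh.symm)
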